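-- pv_equiv track=rewrite | github.com/narzulloevh1308-eng/KIPITTU-pp-python-klr | LR_07/sliding.py | max_elements_greater_than_x
-- ===== SOURCE A (Python) =====
-- def max_elements_greater_than_x(arr, k, x):
--     """
--     Возвращает максимальное количество элементов > x
--     в любом окне длины k.
--     """
--     if not isinstance(arr, list):
--         raise TypeError("arr должен быть списком")
--     if not isinstance(k, int) or not isinstance(x, (int, float)):
--         raise TypeError("k должен быть int, x — число")
--     if k <= 0:
--         raise ValueError("k должен быть больше 0")
--     if k > len(arr):
--         raise ValueError("k не может быть больше длины списка")
--
--     count = sum(1 for i in range(k) if arr[i] > x)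
--     max_count = count
--
--     for right in range(k, len(arr)):
--         if arr[right] > x:
--             count += 1
--         if arr[right - k] > x:
--             count -= 1
--         max_count = max(max_count, count)
--
--     return max_count
-- ===== SOURCE B (Python) =====
-- def max_elements_greater_than_x(arr, k, x):
--     """
--     Возвращает максимальное количество элементов > x
--     в любом окне длины k.
--     """
--     if not isinstance(arr, list):
--         raise TypeError("arr должен быть списком")
--     if not isinstance(k, int) or not isinstance(x, (int, float)):
--         raise TypeError("k должен быть int, x — число")
--     if k <= 0:
--         raise ValueError("k должен быть больше 0")
--     if k > len(arr):
--         raise ValueError("k не может быть больше длины списка")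
--
--     pref = [0]
--     run = 0
--     for v in arr:
--         run += 1 if v > x else 0
--         pref.append(run)
--     return max(pref[i + k] - pref[i] for i in range(len(arr) - k + 1))
-- ===== Notes on version B (the rewrite author's own statement) =====
-- stated objective: alternative
-- what changed: Replaces the incremental add/subtract sliding-window counter with a precomputed prefix-count table followed by a max over window differences pref[i+k]-pref[i].
import Mathlib
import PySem

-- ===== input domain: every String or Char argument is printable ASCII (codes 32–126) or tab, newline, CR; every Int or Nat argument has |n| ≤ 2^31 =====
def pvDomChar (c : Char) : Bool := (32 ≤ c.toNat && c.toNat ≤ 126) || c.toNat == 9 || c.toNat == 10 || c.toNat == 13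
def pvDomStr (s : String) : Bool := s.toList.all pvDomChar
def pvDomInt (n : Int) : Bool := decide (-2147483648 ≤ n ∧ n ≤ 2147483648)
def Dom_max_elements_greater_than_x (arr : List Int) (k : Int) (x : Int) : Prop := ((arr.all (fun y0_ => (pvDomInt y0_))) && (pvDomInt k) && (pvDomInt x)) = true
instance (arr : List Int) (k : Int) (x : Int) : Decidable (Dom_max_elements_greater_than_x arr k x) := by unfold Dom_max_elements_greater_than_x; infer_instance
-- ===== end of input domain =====

-- B replaces A's incremental sliding-window counter with a prefix-count table plus a
-- max over window differences; same O(n) cost, different structure (objective: alternative).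


-- ===== PORT A =====
-- literal port of A: initial count over the first k indices, then the sliding
-- add/subtract loop over right ∈ range(k, len(arr)) carrying (count, max_count)
def max_elements_greater_than_x (arr : List Int) (k : Int) (x : Int) : Int :=
  let count0 : Int := (PySem.List.pyRange 0 k).foldl
    (fun acc i => if PySem.List.pyGetD arr i 0 > x then acc + 1 else acc) 0
  let s := (PySem.List.pyRange k (arr.length : Int)).foldl
    (fun (s : Int × Int) right =>
      let c1 := if PySem.List.pyGetD arr right 0 > x then s.1 + 1 else s.1
      let c2 := if PySem.List.pyGetD arr (right - k) 0 > x then c1 - 1 else c1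
      (c2, max s.2 c2)) (count0, count0)
  s.2

-- ===== PORT B =====
-- literal port of B: build the prefix-count list, then max over pref[i+k]-pref[i];
-- Python's max on the (under Pre_ nonempty) generator is PySem.List.max?, .getD 0 only
-- covers the empty case excluded by Pre_.
def max_elements_greater_than_x_alt (arr : List Int) (k : Int) (x : Int) : Int :=
  let p := arr.foldl (fun (s : List Int × Int) v =>
      let run := s.2 + (if v > x then 1 else 0)
      (s.1 ++ [run], run)) ([0], 0)
  let pref := p.1
  let vals := (PySem.List.pyRange 0 ((arr.length : Int) - k + 1)).map
      (fun i => PySem.List.pyGetD pref (i + k) 0 - PySem.List.pyGetD pref i 0)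
  (PySem.List.max? vals (fun y => y)).getD 0

-- ===== PRECONDITION & SPEC =====
-- A raises ValueError when k ≤ 0 or k > len(arr) (and TypeError on non-int arguments,
-- which the type convention already excludes); Pre_ admits exactly the remaining inputs.
def Pre_max_elements_greater_than_x (arr : List Int) (k : Int) (x : Int) : Prop :=
  0 < k ∧ k ≤ (arr.length : Int)
instance (arr : List Int) (k : Int) (x : Int) : Decidable (Pre_max_elements_greater_than_x arr k x) := by unfold Pre_max_elements_greater_than_x; infer_instance
def pvWitness_max_elements_greater_than_x : List Int × Int × Int := ([3, 1, 4, 1, 5], 2, 2)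

def Spec_max_elements_greater_than_x (arr : List Int) (k : Int) (x : Int) (out : Int) : Prop := out = max_elements_greater_than_x_alt arr k x
instance (arr : List Int) (k : Int) (x : Int) (out : Int) : Decidable (Spec_max_elements_greater_than_x arr k x out) := by unfold Spec_max_elements_greater_than_x; infer_instance

-- ===== CLAIM (what is proved, stated in full; the proofs are below) =====
def Claim_equal_max_elements_greater_than_x : Prop := ∀ (arr : List Int) (k : Int) (x : Int), Dom_max_elements_greater_than_x arr k x → Pre_max_elements_greater_than_x arr k x → Spec_max_elements_greater_than_x arr k x (max_elements_greater_than_x arr k x)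

-- ===== LEMMAS AND PROOFS =====

-- count of elements > x among the first m entries of arr
def pvPC (arr : List Int) (x : Int) (m : Nat) : Int :=
  ((arr.take m).countP (fun a => decide (x < a)) : Int)

-- running max of the window counts wc 0 .. wc t
def pvM (wc : Nat → Int) (t : Nat) : Int :=
  (List.range t).foldl (fun mx j => max mx (wc (j + 1))) (wc 0)

theorem pvPC_succ (arr : List Int) (x : Int) (m : Nat) (hm : m < arr.length) :
    pvPC arr x (m + 1) = pvPC arr x m + (if x < arr.getD m 0 then 1 else 0) := by
  have hg : arr[m]? = some arr[m] := List.getElem?_eq_getElem hm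
  have hd : arr.getD m 0 = arr[m] := by
    rw [List.getD_eq_getElem?_getD, hg]; rfl
  unfold pvPC
  rw [List.take_add_one, hg, hd, Option.toList_some, List.countP_append]
  push_cast [List.countP_cons]
  split_ifs <;> simp_all

theorem pref_gen (x : Int) (l : List Int) : ∀ (acc : List Int) (r : Int),
    l.foldl (fun (s : List Int × Int) v =>
      let run := s.2 + (if v > x then 1 else 0)
      (s.1 ++ [run], run)) (acc, r)
    = (acc ++ (List.range l.length).map
        (fun m => r + ((l.take (m+1)).countP (fun a => decide (x < a)) : Int)),
       r + (l.countP (fun a => decide (x < a)) : Int)) := by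
  induction l with
  | nil => intro acc r; simp
  | cons v l ih =>
    intro acc r
    simp only [List.foldl_cons, ih]
    simp only [Prod.mk.injEq]
    constructor
    · rw [List.length_cons, List.range_succ_eq_map, List.map_cons, List.map_map,
        List.append_assoc]
      congr 1
      rw [List.singleton_append]
      congr 1
      · show r + _ = r + _
        simp [List.countP_cons]
      · apply List.map_congr_left
        intro m _
        simp [Function.comp, List.countP_cons]
        ring
    · simp [List.countP_cons]
      split_ifs <;> ring

theorem count0_eq (arr : List Int) (x : Int) (kn : Nat) (hk : kn ≤ arr.length) :
    (PySem.List.pyRange 0 (kn : Int)).foldl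
      (fun acc i => if PySem.List.pyGetD arr i 0 > x then acc + 1 else acc) 0
      = pvPC arr x kn := by
  induction kn with
  | zero =>
    simp [PySem.List.pyRange_one_eq_nil, pvPC]
  | succ m ih =>
    have hm : m < arr.length := by omega
    have h0 : (0:Int) ≤ (m:Int) := by positivity
    rw [Nat.cast_succ, PySem.List.pyRange_one_succ_right h0, List.foldl_append,
      ih (by omega)]
    simp only [List.foldl_cons, List.foldl_nil, PySem.List.pyGetD_natCast]
    rw [pvPC_succ arr x m hm]
    split_ifs <;> omega

theorem pvM_succ (wc : Nat → Int) (t : Nat) :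
    pvM wc (t + 1) = max (pvM wc t) (wc (t + 1)) := by
  unfold pvM
  rw [List.range_succ, List.foldl_append]
  simp

theorem loopA_aux (arr : List Int) (x : Int) (kn : Nat) (hk1 : 0 < kn)
    (t : Nat) (ht : kn + t ≤ arr.length) :
    ((PySem.List.pyRange (kn : Int) ((kn : Int) + (t : Int))).foldl
      (fun (s : Int × Int) right =>
        let c1 := if PySem.List.pyGetD arr right 0 > x then s.1 + 1 else s.1
        let c2 := if PySem.List.pyGetD arr (right - (kn : Int)) 0 > x then c1 - 1 else c1
        (c2, max s.2 c2)) (pvPC arr x kn, pvPC arr x kn))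
      = (pvPC arr x (t + kn) - pvPC arr x t,
         pvM (fun j => pvPC arr x (j + kn) - pvPC arr x j) (t)) := by
  induction t with
  | zero =>
    simp [PySem.List.pyRange_one_eq_nil, pvM, pvPC]
  | succ m ih =>
    have hle : (kn : Int) ≤ (kn : Int) + (m : Int) := by omega
    have hcast : (kn : Int) + ((m : Nat) + 1 : Nat) = ((kn : Int) + (m : Int)) + 1 := by
      push_cast; ring
    rw [hcast, PySem.List.pyRange_one_succ_right hle, List.foldl_append, ih (by omega)]
    have h1 : (kn : Int) + (m : Int) = ((kn + m : Nat) : Int) := by push_cast; ring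
    have h2 : ((kn + m : Nat) : Int) - (kn : Int) = ((m : Nat) : Int) := by push_cast; ring
    simp only [List.foldl_cons, List.foldl_nil, h1, h2, PySem.List.pyGetD_natCast, gt_iff_lt]
    rw [pvM_succ]
    have e1 : pvPC arr x (kn + m + 1) = pvPC arr x (kn + m) + (if x < arr.getD (kn + m) 0 then 1 else 0) :=
      pvPC_succ arr x (kn + m) (by omega)
    have e2 : pvPC arr x (m + 1) = pvPC arr x m + (if x < arr.getD m 0 then 1 else 0) :=
      pvPC_succ arr x m (by omega)
    have hmk : m + 1 + kn = kn + m + 1 := by omega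
    have hkm : m + kn = kn + m := by omega
    rw [Prod.mk.injEq]
    constructor
    · rw [hmk, e1, e2, hkm]
      split_ifs <;> omega
    · congr 1
      rw [hmk, e1, e2, hkm]
      split_ifs <;> omega

theorem loopA_eq (arr : List Int) (x : Int) (kn : Nat) (hk1 : 0 < kn) (hk : kn ≤ arr.length) :
    ((PySem.List.pyRange (kn : Int) (arr.length : Int)).foldl
      (fun (s : Int × Int) right =>
        let c1 := if PySem.List.pyGetD arr right 0 > x then s.1 + 1 else s.1
        let c2 := if PySem.List.pyGetD arr (right - (kn : Int)) 0 > x then c1 - 1 else c1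
        (c2, max s.2 c2)) (pvPC arr x kn, pvPC arr x kn)).2
      = pvM (fun j => pvPC arr x (j + kn) - pvPC arr x j) (arr.length - kn) := by
  have h : (arr.length : Int) = (kn : Int) + ((arr.length - kn : Nat) : Int) := by
    omega
  rw [h, loopA_aux arr x kn hk1 (arr.length - kn) (by omega)]

theorem pref_eq (arr : List Int) (x : Int) :
    (arr.foldl (fun (s : List Int × Int) v =>
      let run := s.2 + (if v > x then 1 else 0)
      (s.1 ++ [run], run)) ([0], 0)).1
      = (List.range (arr.length + 1)).map (fun m => pvPC arr x m) := by
  rw [pref_gen x arr [0] 0, List.range_succ_eq_map, List.map_cons, List.map_map]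
  simp only [List.singleton_append]  -- [0] ++ l = 0 :: l
  simp [pvPC]

theorem altB_eq (arr : List Int) (k x : Int) (hk1 : 0 < k) (hk : k ≤ (arr.length : Int)) :
    max_elements_greater_than_x_alt arr k x
      = pvM (fun j => pvPC arr x (j + k.toNat) - pvPC arr x j) (arr.length - k.toNat) := by
  unfold max_elements_greater_than_x_alt
  simp only [pref_eq arr x]
  have hkn : (k.toNat : Int) = k := Int.toNat_of_nonneg (le_of_lt hk1)
  set n := arr.length with hn
  set kn := k.toNat with hknd
  have hkle : kn ≤ n := by omega
  have hb : (n : Int) - k + 1 = ((n - kn + 1 : Nat) : Int) := by omega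
  rw [hb, PySem.List.pyRange_one, Int.sub_zero, Int.toNat_natCast, List.map_map]
  have hmap : (List.range (n - kn + 1)).map
      ((fun i => PySem.List.pyGetD ((List.range (n + 1)).map (fun m => pvPC arr x m)) (i + k) 0
                - PySem.List.pyGetD ((List.range (n + 1)).map (fun m => pvPC arr x m)) i 0)
        ∘ (fun t : Nat => (0 : Int) + (t : Int)))
      = (List.range (n - kn + 1)).map (fun t => pvPC arr x (t + kn) - pvPC arr x t) := by
    apply List.map_congr_left
    intro t ht
    have ht' : t < n - kn + 1 := List.mem_range.mp ht
    have c1 : (0 : Int) + (t : Int) + k = ((t + kn : Nat) : Int) := by omega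
    have c2 : (0 : Int) + (t : Int) = ((t : Nat) : Int) := by ring
    rw [Function.comp_apply, c1, c2, PySem.List.pyGetD_natCast, PySem.List.pyGetD_natCast,
      PySem.List.getD_map_range _ _ _ _ (by omega), PySem.List.getD_map_range _ _ _ _ (by omega)]
  rw [hmap, List.range_succ_eq_map, List.map_cons, PySem.List.max?_id_cons, Option.getD_some,
    List.map_map, pvM, List.foldl_map]
  simp [Nat.succ_eq_add_one]

-- ===== VERDICT (by name: the statement is the Claim_ definition above) =====
theorem max_elements_greater_than_x_spec : Claim_equal_max_elements_greater_than_x := by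
  intro arr k x _ hpre
  obtain ⟨hk1, hk⟩ := hpre
  unfold Spec_max_elements_greater_than_x
  have hkn : (k.toNat : Int) = k := Int.toNat_of_nonneg (le_of_lt hk1)
  have hk1' : 0 < k.toNat := by omega
  have hk' : k.toNat ≤ arr.length := by omega
  rw [altB_eq arr k x hk1 hk]
  unfold max_elements_greater_than_x
  rw [← hkn, count0_eq arr x k.toNat hk', loopA_eq arr x k.toNat hk1' hk']
  simp only [Int.toNat_natCast]
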